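-- pv_equiv track=rewrite | github.com/miliar/Code_Jam_Webscraper | solutions_python/Problem_138/1295.py | get_fair
-- ===== SOURCE A (Python) =====
-- def get_fair(N, n, k):
--     score = 0
--     for i in range(0, N):
--         naomi = n[i]
--         if naomi > k[-1]:
--             del k[0]
--             score += 1
--         else:
--             for elem in k:
--                 if elem > naomi:
--                     k.remove(elem)
--                     break
--
--     return score
-- ===== SOURCE B (Python) =====
-- def get_fair(N, n, k):
--     # Persistent max-segment-tree over Ken's blocks: each round finds the first
--     # remaining block greater than naomi (or the last / front block) in O(log K)
--     # instead of A's O(K) list surgery.  The caller's k is not mutated (A mutates it).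
--     # Node shapes: ('leaf', value, alive) | ('node', max_alive_or_None, left, right)
--
--     def seg_max(t):
--         if t[0] == 'leaf':
--             return t[1] if t[2] else None
--         return t[1]
--
--     def mk(l, r):
--         ml, mr = seg_max(l), seg_max(r)
--         if ml is None:
--             m = mr
--         elif mr is None:
--             m = ml
--         else:
--             m = ml if ml >= mr else mr
--         return ('node', m, l, r)
--
--     def build(vals):
--         if len(vals) == 1:
--             return ('leaf', vals[0], True)
--         m = len(vals) // 2
--         return mk(build(vals[:m]), build(vals[m:]))
--
--     def del_first_gt(t, x):
--         # remove the first (leftmost) alive value > x; None if there is none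
--         if t[0] == 'leaf':
--             if t[2] and x < t[1]:
--                 return ('leaf', t[1], False)
--             return None
--         _, _, l, r = t
--         ml = seg_max(l)
--         if ml is not None and x < ml:
--             l2 = del_first_gt(l, x)
--             return mk(l2, r) if l2 is not None else None
--         r2 = del_first_gt(r, x)
--         return mk(l, r2) if r2 is not None else None
--
--     def del_front(t):
--         # remove the leftmost alive value (assumed to exist)
--         if t[0] == 'leaf':
--             return ('leaf', t[1], False)
--         _, _, l, r = t
--         if seg_max(l) is not None:
--             return mk(del_front(l), r)
--         return mk(l, del_front(r))
--
--     def seg_last(t):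
--         # rightmost alive value, or None
--         if t[0] == 'leaf':
--             return t[1] if t[2] else None
--         _, _, l, r = t
--         if seg_max(r) is not None:
--             return seg_last(r)
--         return seg_last(l)
--
--     score = 0
--     if N > 0:
--         t = build(list(k))
--         for i in range(N):
--             naomi = n[i]
--             last = seg_last(t)
--             if naomi > last:
--                 score += 1
--                 t = del_front(t)
--             else:
--                 t2 = del_first_gt(t, naomi)
--                 if t2 is not None:
--                     t = t2
--     return score
-- ===== Notes on version B (the rewrite author's own statement) =====
-- stated objective: faster
-- what changed: B replaces A's in-place list surgery (O(K)-cost del k[0] / linear scan + k.remove each round) by a persistent max-segment-tree over Ken's blocks: the last alive block, the front alive block and the first alive block greater than naomi are each found and removed by an O(log K) tree descent guided by cached subtree maxima; B does not mutate the caller's k (A does).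
-- outside the precondition, e.g. on get_fair(2, [5, 5], [5]): A returns 0, B returns 0
import Mathlib
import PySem

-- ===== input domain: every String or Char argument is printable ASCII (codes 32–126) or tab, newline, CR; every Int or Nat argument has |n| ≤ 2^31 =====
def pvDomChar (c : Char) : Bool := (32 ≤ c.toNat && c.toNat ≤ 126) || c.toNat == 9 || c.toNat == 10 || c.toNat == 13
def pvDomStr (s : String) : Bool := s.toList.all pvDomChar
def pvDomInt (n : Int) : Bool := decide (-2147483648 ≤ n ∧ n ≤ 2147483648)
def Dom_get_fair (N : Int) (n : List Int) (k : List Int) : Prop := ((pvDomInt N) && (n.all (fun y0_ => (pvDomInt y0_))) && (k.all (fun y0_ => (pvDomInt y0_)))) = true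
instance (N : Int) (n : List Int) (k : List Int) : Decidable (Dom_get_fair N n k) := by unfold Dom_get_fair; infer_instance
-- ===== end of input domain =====

-- B replaces A's in-place del/remove list surgery by a persistent max-segment-tree over Ken's
-- blocks (first-alive-greater / front / last found by tree descent); the equivalence is about the
-- return value only — A mutates the caller's k, B does not.


-- ===== PORT A =====
-- A's inner 'for elem in k: if elem > naomi: … break' — the element it stops at
def aFind (naomi : Int) : List Int → Option Int
  | [] => none
  | e :: t => if naomi < e then some e else aFind naomi t

-- A's else branch: 'k.remove(elem)' for the found elem, or k unchanged
def aElse (naomi : Int) (ks : List Int) : List Int :=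
  match aFind naomi ks with
  | some e => (PySem.List.remove? ks e).getD ks
  | none => ks

-- A's loop body, given naomi = n[i]
def aRound (st : Int × List Int) (naomi : Int) : Int × List Int :=
  if naomi > PySem.List.pyGetD st.2 (-1) 0 then   -- naomi > k[-1]  (k nonempty under Pre_)
    (st.1 + 1, st.2.drop 1)                       -- del k[0]; score += 1
  else
    (st.1, aElse naomi st.2)

def aStep (n : List Int) (st : Int × List Int) (i : Int) : Int × List Int :=
  aRound st (PySem.List.pyGetD n i 0)             -- naomi = n[i]  (in range under Pre_)

def get_fair (N : Int) (n : List Int) (k : List Int) : Int :=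
  ((PySem.List.pyRange 0 N 1).foldl (aStep n) (0, k)).1

-- ===== PORT B =====
-- Source B's tree nodes: ('leaf', value, alive) | ('node', max_alive_or_None, left, right)
inductive Seg
  | leaf : Int → Bool → Seg
  | node : Option Int → Seg → Seg → Seg
deriving DecidableEq, Repr

def segMax : Seg → Option Int                     -- Source B seg_max
  | .leaf v a => if a then some v else none
  | .node m _ _ => m

def segMk (l r : Seg) : Seg :=                    -- Source B mk
  Seg.node
    (match segMax l, segMax r with
      | none, mr => mr
      | some ml, none => some ml
      | some ml, some mr => some (if ml ≥ mr then ml else mr))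
    l r

-- Source B build; Source B never calls it on [] (it would recurse forever there): [] ↦ an empty leaf
def segBuild (vals : List Int) : Seg :=
  match vals with
  | [] => .leaf 0 false
  | [v] => .leaf v true
  | v0 :: v1 :: vs =>
      let m := (v0 :: v1 :: vs).length / 2
      segMk (segBuild ((v0 :: v1 :: vs).take m)) (segBuild ((v0 :: v1 :: vs).drop m))
termination_by vals.length
decreasing_by
  · simp; omega
  · simp; omega

def segDelFirstGt (t : Seg) (x : Int) : Option Seg :=  -- Source B del_first_gt
  match t with
  | .leaf v a => if a && decide (x < v) then some (.leaf v false) else none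
  | .node _ l r =>
    if (match segMax l with | some ml => decide (x < ml) | none => false) then
      (segDelFirstGt l x).map (fun l2 => segMk l2 r)
    else
      (segDelFirstGt r x).map (fun r2 => segMk l r2)

def segDelFront : Seg → Seg                       -- Source B del_front
  | .leaf v _ => .leaf v false
  | .node _ l r => if (segMax l).isSome then segMk (segDelFront l) r else segMk l (segDelFront r)

def segLast : Seg → Option Int                    -- Source B seg_last
  | .leaf v a => if a then some v else none
  | .node _ l r => if (segMax r).isSome then segLast r else segLast l

-- Source B's loop body ('naomi > None' raises TypeError in Python; the none arm is unreachable under Pre_)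
def bStep (st : Int × Seg) (naomi : Int) : Int × Seg :=
  match segLast st.2 with
  | some last =>
      if naomi > last then (st.1 + 1, segDelFront st.2)
      else match segDelFirstGt st.2 naomi with
           | some t2 => (st.1, t2)
           | none => (st.1, st.2)
  | none => st

def get_fair_alt (N : Int) (n : List Int) (k : List Int) : Int :=
  if N > 0 then
    ((PySem.List.pyRange 0 N 1).foldl
      (fun st i => bStep st (PySem.List.pyGetD n i 0)) (0, segBuild k)).1
  else 0

-- ===== PRECONDITION & SPEC =====
-- Pre_ excludes exactly the inputs on which A raises IndexError: N > len(n) (n[i] fails), or Ken's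
-- blocks running out before the N rounds end (k[-1] on the emptied list fails).  N ≤ len(k) is the
-- closed-form guarantee for the latter and is slightly narrower than A's exact raising set: a run
-- with N > len(k) survives only through exact-tie rounds (naomi equal to the current last and
-- maximal block, removing nothing), and on those excluded returning inputs B returns the same
-- value as A (see the cite) — they are excluded only because A's raising set has no closed form.
def Pre_get_fair (N : Int) (n : List Int) (k : List Int) : Prop :=
  N ≤ (n.length : Int) ∧ N ≤ (k.length : Int)
instance (N : Int) (n : List Int) (k : List Int) : Decidable (Pre_get_fair N n k) := by
  unfold Pre_get_fair; infer_instance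

def pvWitness_get_fair : Int × List Int × List Int := (2, [5, 1], [3, 3])

def Spec_get_fair (N : Int) (n : List Int) (k : List Int) (out : Int) : Prop := out = get_fair_alt N n k
instance (N : Int) (n : List Int) (k : List Int) (out : Int) : Decidable (Spec_get_fair N n k out) := by unfold Spec_get_fair; infer_instance

-- ===== CLAIM (what is proved, stated in full; the proofs are below) =====
def Claim_equal_get_fair : Prop := ∀ (N : Int) (n : List Int) (k : List Int), Dom_get_fair N n k → Pre_get_fair N n k → Spec_get_fair N n k (get_fair N n k)

-- ===== LEMMAS AND PROOFS =====

-- the alive values of a tree, left to right (the list A is working on)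
def toL : Seg → List Int
  | .leaf v a => if a then [v] else []
  | .node _ l r => toL l ++ toL r

-- maximum of a list, combined as Source B's mk combines the caches
def omaxL : List Int → Option Int
  | [] => none
  | x :: xs => match omaxL xs with | none => some x | some m => some (if x ≥ m then x else m)

-- a node's cached max is the max of its alive values
def wfS : Seg → Prop
  | .leaf _ _ => True
  | .node m l r => wfS l ∧ wfS r ∧ m = omaxL (toL l ++ toL r)

-- position of the first element > naomi (= length of the ≤-prefix)
def wScan (naomi : Int) : List Int → Nat
  | [] => 0
  | e :: t => if e ≤ naomi then wScan naomi t + 1 else 0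

theorem omaxL_eq_none_iff {xs : List Int} : omaxL xs = none ↔ xs = [] := by
  cases xs with
  | nil => simp [omaxL]
  | cons x t => simp only [omaxL]; cases omaxL t <;> simp

theorem omaxL_spec {xs : List Int} {m : Int} (h : omaxL xs = some m) :
    m ∈ xs ∧ ∀ e ∈ xs, e ≤ m := by
  induction xs generalizing m with
  | nil => simp [omaxL] at h
  | cons x t ih =>
    simp only [omaxL] at h
    cases ht : omaxL t with
    | none =>
      rw [ht] at h
      obtain rfl : x = m := by simpa using h
      have : t = [] := omaxL_eq_none_iff.mp ht
      subst this; simp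
    | some mt =>
      rw [ht] at h
      obtain ⟨hmem, hmax⟩ := ih ht
      obtain rfl : (if x ≥ mt then x else mt) = m := by simpa using h
      constructor
      · by_cases hx : x ≥ mt <;> simp [hx, hmem]
      · intro e he
        rcases List.mem_cons.mp he with rfl | he
        · split_ifs <;> omega
        · have := hmax e he; split_ifs <;> omega

theorem omaxL_append (xs ys : List Int) :
    omaxL (xs ++ ys) =
      (match omaxL xs, omaxL ys with
        | none, mr => mr
        | some ml, none => some ml
        | some ml, some mr => some (if ml ≥ mr then ml else mr)) := by
  induction xs with
  | nil => simp only [List.nil_append]; cases omaxL ys <;> rfl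
  | cons x t ih =>
    simp only [List.cons_append, omaxL, ih]
    cases ht : omaxL t <;> cases hy : omaxL ys <;>
      simp only [] <;> split_ifs <;> simp <;> omega

theorem segMax_eq {t : Seg} (h : wfS t) : segMax t = omaxL (toL t) := by
  cases t with
  | leaf v a => cases a <;> simp [segMax, toL, omaxL]
  | node m l r => exact h.2.2

theorem segMk_wf {l r : Seg} (hl : wfS l) (hr : wfS r) :
    wfS (segMk l r) ∧ toL (segMk l r) = toL l ++ toL r := by
  refine ⟨⟨hl, hr, ?_⟩, rfl⟩
  rw [segMax_eq hl, segMax_eq hr, omaxL_append]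

theorem segBuild_spec (vals : List Int) :
    wfS (segBuild vals) ∧ toL (segBuild vals) = vals := by
  match vals with
  | [] => simp [segBuild, wfS, toL]
  | [v] => simp [segBuild, wfS, toL]
  | v0 :: v1 :: vs =>
    rw [segBuild]
    have h1 := segBuild_spec ((v0 :: v1 :: vs).take ((v0 :: v1 :: vs).length / 2))
    have h2 := segBuild_spec ((v0 :: v1 :: vs).drop ((v0 :: v1 :: vs).length / 2))
    have hmk := segMk_wf h1.1 h2.1
    exact ⟨hmk.1, by rw [hmk.2, h1.2, h2.2, List.take_append_drop]⟩
termination_by vals.length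
decreasing_by
  · simp; omega
  · simp; omega

theorem segLast_eq {t : Seg} (h : wfS t) : segLast t = (toL t).getLast? := by
  induction t with
  | leaf v a => cases a <;> simp [segLast, toL]
  | node m l r ihl ihr =>
    obtain ⟨hl, hr, _⟩ := h
    simp only [segLast, toL]
    by_cases hrs : (segMax r).isSome
    · rw [if_pos hrs, ihr hr]
      have hrne : toL r ≠ [] := by
        intro hh; rw [segMax_eq hr, hh] at hrs; simp [omaxL] at hrs
      exact (List.getLast?_append_of_ne_nil (toL l) hrne).symm
    · rw [if_neg hrs, ihl hl]
      have hre : toL r = [] := by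
        rw [segMax_eq hr] at hrs
        rcases hh : omaxL (toL r) with _ | mm
        · exact omaxL_eq_none_iff.mp hh
        · rw [hh] at hrs; simp at hrs
      rw [hre, List.append_nil]

theorem segDelFront_spec {t : Seg} (h : wfS t) (hne : toL t ≠ []) :
    wfS (segDelFront t) ∧ toL (segDelFront t) = (toL t).drop 1 := by
  induction t with
  | leaf v a =>
    cases a with
    | false => simp [toL] at hne
    | true => simp [segDelFront, toL, wfS]
  | node m l r ihl ihr =>
    obtain ⟨hl, hr, _⟩ := h
    simp only [segDelFront, toL]
    by_cases hls : (segMax l).isSome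
    · have hlne : toL l ≠ [] := by
        intro hh; rw [segMax_eq hl, hh] at hls; simp [omaxL] at hls
      obtain ⟨hw, ht⟩ := ihl hl hlne
      obtain ⟨hw2, ht2⟩ := segMk_wf hw hr
      rw [if_pos hls]
      refine ⟨hw2, ?_⟩
      rw [ht2, ht]
      obtain ⟨x, xs, hx⟩ := List.exists_cons_of_ne_nil hlne
      rw [hx]; simp
    · have hle : toL l = [] := by
        rw [segMax_eq hl] at hls
        rcases hh : omaxL (toL l) with _ | mm
        · exact omaxL_eq_none_iff.mp hh
        · rw [hh] at hls; simp at hls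
      have hrne : toL r ≠ [] := by
        intro hh; rw [toL] at hne; rw [hle, hh] at hne; simp at hne
      obtain ⟨hw, ht⟩ := ihr hr hrne
      obtain ⟨hw2, ht2⟩ := segMk_wf hl hw
      rw [if_neg hls]
      exact ⟨hw2, by rw [ht2, ht, hle]; simp⟩

theorem wScan_append_of_all {x : Int} {xs : List Int} (ys : List Int)
    (h : ∀ e ∈ xs, e ≤ x) : wScan x (xs ++ ys) = xs.length + wScan x ys := by
  induction xs with
  | nil => simp
  | cons e t ih =>
    have he : e ≤ x := h e (by simp)
    simp only [List.cons_append, wScan, if_pos he, List.length_cons]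
    rw [ih (fun e he => h e (by simp [he]))]
    omega

theorem wScan_append_of_ex {x : Int} {xs : List Int} (ys : List Int)
    (h : ∃ e ∈ xs, x < e) : wScan x (xs ++ ys) = wScan x xs := by
  induction xs with
  | nil => simp at h
  | cons e t ih =>
    by_cases he : e ≤ x
    · have : ∃ e ∈ t, x < e := by
        rcases h with ⟨e', he', hlt⟩
        rcases List.mem_cons.mp he' with rfl | hm
        · omega
        · exact ⟨e', hm, hlt⟩
      simp only [List.cons_append, wScan, if_pos he, ih this]
    · simp only [List.cons_append, wScan, if_neg he]

theorem wScan_lt {naomi : Int} {w : List Int} (h : ∃ e ∈ w, naomi < e) :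
    wScan naomi w < w.length := by
  induction w with
  | nil => simp at h
  | cons e t ih =>
    by_cases he : e ≤ naomi
    · have : ∃ x ∈ t, naomi < x := by
        rcases h with ⟨x, hx, hlt⟩
        rcases List.mem_cons.mp hx with rfl | hxt
        · omega
        · exact ⟨x, hxt, hlt⟩
      simp only [wScan, if_pos he, List.length_cons]
      exact Nat.succ_lt_succ (ih this)
    · simp [wScan, he]

theorem segDelFirstGt_none {t : Seg} (h : wfS t) {x : Int}
    (hall : ∀ e ∈ toL t, e ≤ x) : segDelFirstGt t x = none := by
  induction t with
  | leaf v a =>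
    cases a with
    | false => simp [segDelFirstGt]
    | true =>
      have : v ≤ x := hall v (by simp [toL])
      simp [segDelFirstGt]; omega
  | node m l r ihl ihr =>
    obtain ⟨hl, hr, _⟩ := h
    have halll : ∀ e ∈ toL l, e ≤ x := fun e he => hall e (by simp [toL, he])
    have hallr : ∀ e ∈ toL r, e ≤ x := fun e he => hall e (by simp [toL, he])
    have hguard : (match segMax l with | some ml => decide (x < ml) | none => false) = false := by
      rw [segMax_eq hl]
      rcases hh : omaxL (toL l) with _ | ml
      · rfl
      · have := (omaxL_spec hh).1
        have := halll ml this
        simp; omega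
    simp only [segDelFirstGt, hguard, if_false, Bool.false_eq_true]
    rw [ihr hr hallr]
    rfl

theorem segDelFirstGt_some {t : Seg} (h : wfS t) {x : Int}
    (hex : ∃ e ∈ toL t, x < e) :
    ∃ t2, segDelFirstGt t x = some t2 ∧ wfS t2 ∧
      toL t2 = (toL t).take (wScan x (toL t)) ++ (toL t).drop (wScan x (toL t) + 1) := by
  induction t with
  | leaf v a =>
    cases a with
    | false => simp [toL] at hex
    | true =>
      obtain ⟨e, he, hlt⟩ := hex
      have hev : e = v := by simpa [toL] using he
      rw [hev] at hlt
      have hnle : ¬ v ≤ x := by omega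
      refine ⟨.leaf v false, ?_, trivial, ?_⟩
      · simp [segDelFirstGt]; omega
      · simp [toL, wScan, hnle]
  | node m l r ihl ihr =>
    obtain ⟨hl, hr, _⟩ := h
    by_cases hexl : ∃ e ∈ toL l, x < e
    · -- the first greater block is in the left subtree
      have hguard : (match segMax l with | some ml => decide (x < ml) | none => false) = true := by
        rw [segMax_eq hl]
        rcases hh : omaxL (toL l) with _ | ml
        · rw [omaxL_eq_none_iff.mp hh] at hexl; simp at hexl
        · obtain ⟨e, he, hlt⟩ := hexl
          have := (omaxL_spec hh).2 e he
          simp; omega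
      obtain ⟨l2, hdel, hw, htl⟩ := ihl hl hexl
      obtain ⟨hw2, ht2⟩ := segMk_wf hw hr
      refine ⟨segMk l2 r, ?_, hw2, ?_⟩
      · simp only [segDelFirstGt, hguard, if_true, hdel, Option.map_some]
      · have hs := wScan_lt hexl
        have hws : wScan x (toL l ++ toL r) = wScan x (toL l) := wScan_append_of_ex _ hexl
        rw [ht2, htl]
        show _ = (toL (Seg.node m l r)).take _ ++ (toL (Seg.node m l r)).drop _
        simp only [toL, hws]
        rw [List.take_append_of_le_length (by omega), List.drop_append_of_le_length (by omega),
          List.append_assoc]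
    · -- everything in the left subtree is ≤ x; descend right
      push_neg at hexl
      have hexr : ∃ e ∈ toL r, x < e := by
        obtain ⟨e, he, hlt⟩ := hex
        rcases List.mem_append.mp (by simpa [toL] using he) with hm | hm
        · exact absurd hlt (by have := hexl e hm; omega)
        · exact ⟨e, hm, hlt⟩
      have hguard : (match segMax l with | some ml => decide (x < ml) | none => false) = false := by
        rw [segMax_eq hl]
        rcases hh : omaxL (toL l) with _ | ml
        · rfl
        · have := hexl ml (omaxL_spec hh).1
          simp; omega
      obtain ⟨r2, hdel, hw, htr⟩ := ihr hr hexr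
      obtain ⟨hw2, ht2⟩ := segMk_wf hl hw
      refine ⟨segMk l r2, ?_, hw2, ?_⟩
      · simp only [segDelFirstGt, hguard, Bool.false_eq_true, if_false, hdel, Option.map_some]
      · have hws : wScan x (toL l ++ toL r) = (toL l).length + wScan x (toL r) :=
          wScan_append_of_all _ hexl
        rw [ht2, htr]
        show _ = (toL (Seg.node m l r)).take _ ++ (toL (Seg.node m l r)).drop _
        simp only [toL, hws]
        have h1 : (toL l).take ((toL l).length + wScan x (toL r)) = toL l :=
          List.take_of_length_le (by omega)
        have h2 : (toL l).drop ((toL l).length + wScan x (toL r) + 1) = [] :=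
          List.drop_eq_nil_of_le (by omega)
        have e1 : (toL l).length + wScan x (toL r) - (toL l).length = wScan x (toL r) := by omega
        have e2 : (toL l).length + wScan x (toL r) + 1 - (toL l).length = wScan x (toL r) + 1 := by
          omega
        rw [List.take_append, List.drop_append, h1, h2, e1, e2]
        simp [List.append_assoc]

-- A-side characterisations of the inner loop
theorem aFind_eq_none_iff {naomi : Int} {ks : List Int} :
    aFind naomi ks = none ↔ ∀ e ∈ ks, e ≤ naomi := by
  induction ks with
  | nil => simp [aFind]
  | cons e t ih =>
    by_cases h : naomi < e
    · simp only [aFind, if_pos h]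
      constructor
      · intro hh; cases hh
      · intro hh; exact absurd (hh e (by simp)) (by omega)
    · simp only [aFind, if_neg h, ih, List.mem_cons]
      constructor
      · intro hh x hx
        rcases hx with rfl | hx
        · omega
        · exact hh x hx
      · intro hh x hx; exact hh x (Or.inr hx)

theorem aFind_gt {naomi v : Int} : ∀ {ks : List Int}, aFind naomi ks = some v → naomi < v := by
  intro ks
  induction ks with
  | nil => simp [aFind]
  | cons e t ih =>
    simp only [aFind]
    split
    · rintro ⟨rfl⟩; assumption
    · exact ih

theorem aFind_mem {naomi v : Int} : ∀ {ks : List Int}, aFind naomi ks = some v → v ∈ ks := by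
  intro ks
  induction ks with
  | nil => simp [aFind]
  | cons e t ih =>
    simp only [aFind]
    split
    · rintro ⟨rfl⟩; simp
    · intro h; exact List.mem_cons_of_mem _ (ih h)

-- A's else branch removes the element right after the ≤-prefix (a no-op when there is none)
theorem aElse_eq (naomi : Int) (ks : List Int) :
    aElse naomi ks = ks.take (wScan naomi ks) ++ ks.drop (wScan naomi ks + 1) := by
  induction ks with
  | nil => simp [aElse, aFind, wScan]
  | cons e t ih =>
    by_cases h : naomi < e
    · have hne : ¬ e ≤ naomi := not_le.mpr h
      simp [aElse, aFind, wScan, h, hne]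
    · have hle : e ≤ naomi := not_lt.mp h
      simp only [aElse, aFind, if_neg h, wScan, if_pos hle]
      cases hf : aFind naomi t with
      | none =>
        simp only [aElse, hf] at ih
        simpa [List.take_succ_cons, List.drop_succ_cons] using congrArg (e :: ·) ih
      | some v =>
        have hv : naomi < v := aFind_gt hf
        have hvm : v ∈ t := aFind_mem hf
        have hvne : e ≠ v := by intro hh; subst hh; exact h hv
        show (PySem.List.remove? (e :: t) v).getD (e :: t)
            = List.take (wScan naomi t + 1) (e :: t) ++ List.drop (wScan naomi t + 1 + 1) (e :: t)
        rw [PySem.List.remove?_cons_of_ne t hvne]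
        rw [PySem.List.remove?_eq_some_erase t v hvm]
        simp only [aElse, hf, PySem.List.remove?_eq_some_erase t v hvm, Option.getD_some] at ih
        simpa [List.take_succ_cons, List.drop_succ_cons] using congrArg (e :: ·) ih

-- the simulation: B's tree always abstracts to A's current list
theorem sim (xs : List Int) : ∀ (score : Int) (t : Seg) (ks : List Int),
    wfS t → toL t = ks → xs.length ≤ ks.length →
    (xs.foldl aRound (score, ks)).1 = (xs.foldl bStep (score, t)).1 := by
  induction xs with
  | nil => intro score t ks _ _ _; simp
  | cons naomi rest ih =>
    intro score t ks hwf htl hlen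
    have hlen' : rest.length + 1 ≤ ks.length := by simpa using hlen
    have hne : ks ≠ [] := by intro hh; rw [hh] at hlen'; simp at hlen'
    have hlast : segLast t = some (ks.getLast hne) := by
      rw [segLast_eq hwf, htl, List.getLast?_eq_some_getLast hne]
    have hget : PySem.List.pyGetD ks (-1) 0 = ks.getLast hne := PySem.List.pyGetD_neg_one ks 0 hne
    simp only [List.foldl_cons]
    by_cases hcond : naomi > ks.getLast hne
    · -- win round: score += 1, drop the front block
      have hA : aRound (score, ks) naomi = (score + 1, ks.drop 1) := by
        simp only [aRound, hget]
        rw [if_pos hcond]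
      have hB : bStep (score, t) naomi = (score + 1, segDelFront t) := by
        simp only [bStep, hlast]
        rw [if_pos hcond]
      obtain ⟨hw, ht⟩ := segDelFront_spec hwf (by rw [htl]; exact hne)
      rw [hA, hB]
      exact ih (score + 1) _ _ hw (by rw [ht, htl]) (by rw [List.length_drop]; omega)
    · -- remove the first block greater than naomi (if any)
      have hA : aRound (score, ks) naomi = (score, aElse naomi ks) := by
        simp only [aRound, hget]
        rw [if_neg hcond]
      set s := wScan naomi ks with hs
      by_cases hex : ∃ e ∈ ks, naomi < e
      · obtain ⟨t2, hdel, hw, ht⟩ := segDelFirstGt_some hwf (by rw [htl]; exact hex)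
        have hB : bStep (score, t) naomi = (score, t2) := by
          simp only [bStep, hlast]
          rw [if_neg hcond, hdel]
        rw [hA, hB, aElse_eq]
        have hslt : s < ks.length := wScan_lt hex
        refine ih score _ _ hw (by rw [ht, htl]) ?_
        rw [List.length_append, List.length_take, List.length_drop]
        omega
      · have hB : bStep (score, t) naomi = (score, t) := by
          simp only [bStep, hlast]
          rw [if_neg hcond, segDelFirstGt_none hwf]
          rw [htl]
          push_neg at hex
          exact fun e he => by have := hex e he; omega
        have hAe : aElse naomi ks = ks := by
          simp only [aElse]
          rw [aFind_eq_none_iff.mpr (by push_neg at hex; exact fun e he => by have := hex e he; omega)]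
        rw [hA, hB, hAe]
        exact ih score _ _ hwf htl (by omega)

-- ===== VERDICT (by name: the statement is the Claim_ definition above) =====
theorem get_fair_spec : Claim_equal_get_fair := by
  intro N n k _ hpre
  obtain ⟨hn, hk⟩ := hpre
  unfold Spec_get_fair get_fair get_fair_alt
  by_cases hN : N > 0
  · rw [if_pos hN]
    set xs := n.take N.toNat with hxs
    have hlen : xs.length = N.toNat := by
      simp [hxs, List.length_take]; omega
    have hrange : PySem.List.pyRange 0 N 1 = PySem.List.pyRange 0 (xs.length : Int) 1 := by
      rw [hlen]; congr 1; omega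
    have hgetc : ∀ j : Int, j ∈ PySem.List.pyRange 0 N 1 →
        PySem.List.pyGetD n j 0 = PySem.List.pyGetD xs j 0 := by
      intro j hj
      have hjb := PySem.List.mem_pyRange_one.mp hj
      rw [PySem.List.pyGetD_eq_getElem n 0 hjb.1 (by omega),
          PySem.List.pyGetD_eq_getElem xs 0 hjb.1 (by rw [hlen]; omega)]
      simp [hxs]
    have hcongA : (PySem.List.pyRange 0 N 1).foldl (aStep n) (0, k)
        = (PySem.List.pyRange 0 N 1).foldl (fun acc j => aRound acc (PySem.List.pyGetD xs j 0)) (0, k) := by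
      apply PySem.List.foldl_congr_mem
      intro acc j hj
      show aRound acc (PySem.List.pyGetD n j 0) = _
      rw [hgetc j hj]
    have hcongB : (PySem.List.pyRange 0 N 1).foldl
          (fun st i => bStep st (PySem.List.pyGetD n i 0)) (0, segBuild k)
        = (PySem.List.pyRange 0 N 1).foldl
          (fun st i => bStep st (PySem.List.pyGetD xs i 0)) (0, segBuild k) := by
      apply PySem.List.foldl_congr_mem
      intro acc j hj
      rw [hgetc j hj]
    rw [hcongA, hcongB, hrange,
      PySem.List.foldl_pyRange_zero_pyGetD' xs 0 aRound (0, k),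
      PySem.List.foldl_pyRange_zero_pyGetD' xs 0 bStep (0, segBuild k)]
    obtain ⟨hw, ht⟩ := segBuild_spec k
    exact sim xs 0 (segBuild k) k hw ht (by rw [hlen]; omega)
  · rw [if_neg hN]
    have : PySem.List.pyRange 0 N 1 = [] := by
      simp [PySem.List.pyRange]; omega
    simp [this]
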